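-- pv_equiv track=rewrite | github.com/hellcatjack/LeanQuantHub | backend/app/services/lean_market.py | _clip_symbols
-- ===== SOURCE A (Python) =====
-- from typing import Any, Iterable
--
-- def normalize_symbol(symbol: str | None) -> str:
--     return str(symbol or "").strip().upper()
--
-- def _clip_symbols(symbols: Iterable[str], max_symbols: int | None) -> list[str]:
--     items = sorted({normalize_symbol(symbol) for symbol in symbols if normalize_symbol(symbol)})
--     if max_symbols is not None:
--         try:
--             limit = max(0, int(max_symbols))
--         except (TypeError, ValueError):
--             limit = None
--         if limit:
--             return items[:limit]
--     return items
-- ===== SOURCE B (Python) =====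
-- def _clip_symbols(symbols, max_symbols):
--     normed = sorted(str(symbol or "").strip().upper() for symbol in symbols)
--     items = []
--     for s in normed:
--         if s and (not items or items[-1] != s):
--             items.append(s)
--     if max_symbols is not None:
--         try:
--             limit = max(0, int(max_symbols))
--         except (TypeError, ValueError):
--             limit = None
--         if limit:
--             return items[:limit]
--     return items
-- ===== Notes on version B (the rewrite author's own statement) =====
-- stated objective: alternative
-- what changed: Set-based dedup of normalized symbols followed by sorting is replaced by normalizing each symbol once, sorting all of them, and deduplicating (and dropping empties) in one adjacent-scan pass over the sorted list; the clip logic is unchanged.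
import Mathlib
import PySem

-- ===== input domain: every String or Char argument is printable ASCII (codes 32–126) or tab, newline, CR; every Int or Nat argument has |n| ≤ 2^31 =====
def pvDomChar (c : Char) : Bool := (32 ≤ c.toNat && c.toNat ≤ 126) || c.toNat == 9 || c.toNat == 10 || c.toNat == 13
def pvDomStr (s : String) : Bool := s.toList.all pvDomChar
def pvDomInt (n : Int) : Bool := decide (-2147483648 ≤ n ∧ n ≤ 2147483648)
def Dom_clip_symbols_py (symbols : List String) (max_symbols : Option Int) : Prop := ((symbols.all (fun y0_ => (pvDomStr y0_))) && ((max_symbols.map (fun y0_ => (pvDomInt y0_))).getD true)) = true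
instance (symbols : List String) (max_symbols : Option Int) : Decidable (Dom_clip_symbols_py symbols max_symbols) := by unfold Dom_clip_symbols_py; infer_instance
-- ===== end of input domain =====

-- B replaces A's set-based dedup (collect into a set, then sort) by sorting all normalized
-- symbols first and removing duplicates/empties in one adjacent scan; the clip code is unchanged.

-- ===== PORT A =====
-- str(symbol or "").strip().upper(): for a String argument, 'symbol or ""' is the string itself
def normalize_symbol_py (symbol : String) : String :=
  PySem.Str.upper (PySem.Str.strip symbol)

def clip_symbols_py (symbols : List String) (max_symbols : Option Int) : List String :=
  let items := PySem.List.sorted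
    (PySem.Set.ofList ((symbols.filter (fun s => normalize_symbol_py s != "")).map normalize_symbol_py))
    (fun x => x) false
  match max_symbols with
  | none => items
  | some m =>
      -- int(max_symbols) cannot raise on an int, so the except branch is dead
      let limit : Int := max 0 m
      if limit ≠ 0 then PySem.List.slice items none (some limit) else items

-- ===== PORT B =====
def clip_symbols_py_alt (symbols : List String) (max_symbols : Option Int) : List String :=
  let normed := PySem.List.sorted
    (symbols.map (fun symbol => PySem.Str.upper (PySem.Str.strip symbol))) (fun x => x) false
  let items := normed.foldl
    (fun acc s => if s != "" && (acc.isEmpty || acc.getLast? != some s) then acc ++ [s] else acc) []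
  match max_symbols with
  | none => items
  | some m =>
      let limit : Int := max 0 m
      if limit ≠ 0 then PySem.List.slice items none (some limit) else items

-- ===== PRECONDITION & SPEC =====
def Spec_clip_symbols_py (symbols : List String) (max_symbols : Option Int) (out : List String) : Prop := out = clip_symbols_py_alt symbols max_symbols
instance (symbols : List String) (max_symbols : Option Int) (out : List String) : Decidable (Spec_clip_symbols_py symbols max_symbols out) := by unfold Spec_clip_symbols_py; infer_instance

-- ===== CLAIM (what is proved, stated in full; the proofs are below) =====
def Claim_equal_clip_symbols_py : Prop := ∀ (symbols : List String) (max_symbols : Option Int), Dom_clip_symbols_py symbols max_symbols → Spec_clip_symbols_py symbols max_symbols (clip_symbols_py symbols max_symbols)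

-- ===== LEMMAS AND PROOFS =====

-- every element of a strictly increasing list is ≤ its last element
theorem le_getLast?_of_pairwise_lt : ∀ (l : List String), l.Pairwise (· < ·) →
    ∀ (b : String), l.getLast? = some b → ∀ a ∈ l, a ≤ b := by
  intro l
  induction l with
  | nil => intro _ b hb; simp at hb
  | cons x t ih =>
    intro hl b hb a ha
    cases t with
    | nil =>
      simp at hb ha; simp [ha, hb]
    | cons y t' =>
      rw [List.getLast?_cons_cons] at hb
      have hbt : b ∈ y :: t' := List.mem_of_getLast? hb
      rcases List.mem_cons.mp ha with h | h
      · subst h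
        exact le_of_lt ((List.pairwise_cons.mp hl).1 b hbt)
      · exact ih (List.pairwise_cons.mp hl).2 b hb a h

-- two strictly increasing lists with the same members are equal
theorem chain_eq (l₁ : List String) : ∀ (l₂ : List String), l₁.Pairwise (· < ·) →
    l₂.Pairwise (· < ·) → (∀ y, y ∈ l₁ ↔ y ∈ l₂) → l₁ = l₂ := by
  induction l₁ with
  | nil =>
    intro l₂ _ _ hm
    cases l₂ with
    | nil => rfl
    | cons b t => exact absurd ((hm b).mpr (by simp)) (by simp)
  | cons a t ih =>
    intro l₂ h₁ h₂ hm
    cases l₂ with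
    | nil => exact absurd ((hm a).mp (by simp)) (by simp)
    | cons b t₂ =>
      have hab : a = b := by
        have ha2 : a ∈ b :: t₂ := (hm a).mp (by simp)
        have hb1 : b ∈ a :: t := (hm b).mpr (by simp)
        rcases List.mem_cons.mp ha2 with h | h
        · exact h
        · rcases List.mem_cons.mp hb1 with h' | h'
          · exact h'.symm
          · exact absurd ((List.pairwise_cons.mp h₁).1 b h')
              (not_lt.mpr (le_of_lt ((List.pairwise_cons.mp h₂).1 a h)))
      subst hab
      have ht : t = t₂ := by
        apply ih t₂ (List.pairwise_cons.mp h₁).2 (List.pairwise_cons.mp h₂).2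
        intro y
        constructor
        · intro hy
          have hne : y ≠ a := fun h => absurd ((List.pairwise_cons.mp h₁).1 y hy)
            (by simp [h])
          rcases List.mem_cons.mp ((hm y).mp (List.mem_cons_of_mem a hy)) with h | h
          · exact absurd h hne
          · exact h
        · intro hy
          have hne : y ≠ a := fun h => absurd ((List.pairwise_cons.mp h₂).1 y hy)
            (by simp [h])
          rcases List.mem_cons.mp ((hm y).mpr (List.mem_cons_of_mem a hy)) with h | h
          · exact absurd h hne
          · exact h
      rw [ht]

-- the fold step of B's adjacent-dedup loop
def bStep (acc : List String) (s : String) : List String :=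
  if s != "" && (acc.isEmpty || acc.getLast? != some s) then acc ++ [s] else acc

-- invariant of B's loop: over a (≤)-sorted input, starting from a strictly increasing
-- accumulator below the input, the result is strictly increasing and its members are
-- the old ones plus the nonempty inputs
theorem bFold_invariant (l : List String) : ∀ (acc : List String),
    l.Pairwise (· ≤ ·) → acc.Pairwise (· < ·) →
    (∀ a ∈ acc, ∀ x ∈ l, a ≤ x) →
    (l.foldl bStep acc).Pairwise (· < ·) ∧
    (∀ y, y ∈ l.foldl bStep acc ↔ y ∈ acc ∨ (y ∈ l ∧ y ≠ "")) := by
  induction l with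
  | nil => intro acc _ hacc _; simpa using hacc
  | cons x l' ih =>
    intro acc hl hacc hb
    have hl' : l'.Pairwise (· ≤ ·) := (List.pairwise_cons.mp hl).2
    by_cases hx : x = ""
    · -- empty string: skipped
      have hstep : bStep acc x = acc := by simp [bStep, hx]
      rw [List.foldl_cons, hstep]
      obtain ⟨hp, hmem⟩ := ih acc hl' hacc (fun a ha z hz => hb a ha z (List.mem_cons_of_mem x hz))
      refine ⟨hp, fun y => ?_⟩
      rw [hmem]
      constructor
      · rintro (h | ⟨h1, h2⟩)
        · exact Or.inl h
        · exact Or.inr ⟨List.mem_cons_of_mem x h1, h2⟩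
      · rintro (h | ⟨h1, h2⟩)
        · exact Or.inl h
        · rcases List.mem_cons.mp h1 with h | h
          · exact absurd (h.trans hx) h2
          · exact Or.inr ⟨h, h2⟩
    · by_cases hlast : acc.getLast? = some x
      · -- duplicate of the last kept element: skipped
        have hne : acc ≠ [] := by intro h; rw [h] at hlast; simp at hlast
        have hstep : bStep acc x = acc := by
          simp [bStep, hlast, List.isEmpty_iff, hne]
        rw [List.foldl_cons, hstep]
        have hxacc : x ∈ acc := List.mem_of_getLast? hlast
        obtain ⟨hp, hmem⟩ := ih acc hl' hacc (fun a ha z hz => hb a ha z (List.mem_cons_of_mem x hz))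
        refine ⟨hp, fun y => ?_⟩
        rw [hmem]
        constructor
        · rintro (h | ⟨h1, h2⟩)
          · exact Or.inl h
          · exact Or.inr ⟨List.mem_cons_of_mem x h1, h2⟩
        · rintro (h | ⟨h1, h2⟩)
          · exact Or.inl h
          · rcases List.mem_cons.mp h1 with h | h
            · exact Or.inl (h ▸ hxacc)
            · exact Or.inr ⟨h, h2⟩
      · -- new element: appended
        have hstep : bStep acc x = acc ++ [x] := by
          simp [bStep, hx, hlast]
        rw [List.foldl_cons, hstep]
        have hltx : ∀ a ∈ acc, a < x := by
          intro a ha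
          have hle : a ≤ x := hb a ha x (by simp)
          rcases lt_or_eq_of_le hle with h | h
          · exact h
          · exfalso
            have hne : acc ≠ [] := fun hn => by simp [hn] at ha
            obtain ⟨b, hbl⟩ := List.getLast?_isSome.mpr hne |> Option.isSome_iff_exists.mp
            have hab : a ≤ b := le_getLast?_of_pairwise_lt acc hacc b hbl a ha
            have hbx : b ≤ x := hb b (List.mem_of_getLast? hbl) x (by simp)
            have : b = x := le_antisymm hbx (h ▸ hab)
            exact hlast (this ▸ hbl)
        have hacc' : (acc ++ [x]).Pairwise (· < ·) := by
          rw [List.pairwise_append]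
          exact ⟨hacc, by simp, by simpa using hltx⟩
        have hb' : ∀ a ∈ acc ++ [x], ∀ z ∈ l', a ≤ z := by
          intro a ha z hz
          rcases List.mem_append.mp ha with h | h
          · exact hb a h z (List.mem_cons_of_mem x hz)
          · simp at h
            exact h ▸ (List.pairwise_cons.mp hl).1 z hz
        obtain ⟨hp, hmem⟩ := ih (acc ++ [x]) hl' hacc' hb'
        refine ⟨hp, fun y => ?_⟩
        rw [hmem]
        simp only [List.mem_append, List.mem_cons, List.not_mem_nil, or_false]
        constructor
        · rintro ((h | rfl) | ⟨h1, h2⟩)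
          · exact Or.inl h
          · exact Or.inr ⟨Or.inl rfl, hx⟩
          · exact Or.inr ⟨Or.inr h1, h2⟩
        · rintro (h | ⟨rfl | h1, h2⟩)
          · exact Or.inl (Or.inl h)
          · exact Or.inl (Or.inr rfl)
          · exact Or.inr ⟨h1, h2⟩

-- the two deduped, sorted item lists coincide
theorem items_eq (symbols : List String) :
    PySem.List.sorted
      (PySem.Set.ofList ((symbols.filter (fun s => normalize_symbol_py s != "")).map normalize_symbol_py))
      (fun x => x) false =
    (PySem.List.sorted (symbols.map (fun symbol => PySem.Str.upper (PySem.Str.strip symbol)))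
        (fun x => x) false).foldl bStep [] := by
  set normed := PySem.List.sorted (symbols.map (fun symbol => PySem.Str.upper (PySem.Str.strip symbol))) (fun x => x) false with hn
  obtain ⟨hp, hmem⟩ := bFold_invariant normed [] (PySem.List.sorted_pairwise _ _) (by simp) (by simp)
  apply chain_eq _ _ (PySem.List.sorted_ofList_pairwise_lt _) hp
  intro y
  rw [hmem y]
  simp only [PySem.List.mem_sorted, PySem.Set.mem_ofList, List.mem_map, List.mem_filter, hn,
    List.not_mem_nil, false_or, bne_iff_ne, ne_eq, normalize_symbol_py]
  constructor
  · rintro ⟨s, ⟨hs, hne⟩, rfl⟩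
    exact ⟨⟨s, hs, rfl⟩, hne⟩
  · rintro ⟨⟨s, hs, rfl⟩, hne⟩
    exact ⟨s, ⟨hs, hne⟩, rfl⟩

-- ===== VERDICT (by name: the statement is the Claim_ definition above) =====
theorem clip_symbols_py_spec : Claim_equal_clip_symbols_py := by
  intro symbols max_symbols _
  unfold Spec_clip_symbols_py clip_symbols_py clip_symbols_py_alt
  rw [show (fun acc s => if s != "" && (acc.isEmpty || acc.getLast? != some s) then acc ++ [s] else acc) = bStep from rfl]
  rw [items_eq symbols]
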